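-- pv_equiv track=rewrite | github.com/borh-lab/tei-xml-ui-experiment | annotation-ml/src/speech_detection/models/baselines/quote_baseline.py | _char_to_token_idx
-- ===== SOURCE A (Python) =====
-- from typing import Any, Dict, List, Tuple
--
-- def _char_to_token_idx(
--
--     char_idx: int,
--     token_offsets: List[Tuple[int, int]],
-- ) -> int:
--     """Convert character position to token index.
--
--     Args:
--         char_idx: Character position in text
--         token_offsets: List of (start, end) offsets for tokens
--
--     Returns:
--         Token index containing this character, or -1 if not found
--
--     Example:
--         >>> model = QuoteBaselineModel()
--         >>> offsets = [(0, 5), (6, 11)]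
--         >>> model._char_to_token_idx(3, offsets)
--         0
--     """
--     for token_idx, (start, end) in enumerate(token_offsets):
--         # end is exclusive, so we use < (not <=)
--         # but we need to handle the case where char_idx == end - 1 (last char of token)
--         if start <= char_idx < end:
--             return token_idx
--     return -1
-- ===== SOURCE B (Python) =====
-- def _char_to_token_idx(char_idx, token_offsets):
--     matches = [i for i, (start, end) in enumerate(token_offsets)
--                if start <= char_idx < end]
--     return min(matches) if matches else -1
-- ===== Notes on version B (the rewrite author's own statement) =====
-- stated objective: idiomatic
-- what changed: Replaces the early-return scan by a two-stage comprehension: collect all containing token indices, then return the minimum (or -1 if none).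
import Mathlib
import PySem

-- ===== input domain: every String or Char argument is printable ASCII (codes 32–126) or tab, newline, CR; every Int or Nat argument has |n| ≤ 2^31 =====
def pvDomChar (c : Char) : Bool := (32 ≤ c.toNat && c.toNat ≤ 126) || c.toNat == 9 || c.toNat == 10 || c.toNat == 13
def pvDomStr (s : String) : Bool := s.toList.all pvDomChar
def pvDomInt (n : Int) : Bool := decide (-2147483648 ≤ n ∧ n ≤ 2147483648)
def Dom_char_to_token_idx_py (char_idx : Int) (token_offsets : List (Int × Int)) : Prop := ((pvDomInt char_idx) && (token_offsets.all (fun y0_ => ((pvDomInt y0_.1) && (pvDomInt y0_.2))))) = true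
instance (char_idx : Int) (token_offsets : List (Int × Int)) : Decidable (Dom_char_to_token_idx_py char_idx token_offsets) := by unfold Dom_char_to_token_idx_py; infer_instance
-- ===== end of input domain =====

-- B replaces A's early-return scan by a two-stage comprehension (collect containing indices, take the min, -1 if none); idiomatic alternative, same O(n) cost.


-- ===== PORT A =====
-- A's 'for token_idx, (start, end) in enumerate(...)' loop with early return
def ctiA_go (char_idx : Int) (i : Int) : List (Int × Int) → Int
  | [] => -1
  | (s, e) :: rest => if s ≤ char_idx ∧ char_idx < e then i else ctiA_go char_idx (i + 1) rest

def char_to_token_idx_py (char_idx : Int) (token_offsets : List (Int × Int)) : Int :=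
  ctiA_go char_idx 0 token_offsets

-- ===== PORT B =====
-- B: matches = [i for i,(start,end) in enumerate(offs) if start <= c < end]; min(matches) if matches else -1
def char_to_token_idx_py_alt (char_idx : Int) (token_offsets : List (Int × Int)) : Int :=
  let ms := (PySem.List.enumerate token_offsets).filterMap
    (fun p => if p.2.1 ≤ char_idx ∧ char_idx < p.2.2 then some p.1 else none)
  match PySem.List.min? ms (fun x => x) with
  | some m => m
  | none => -1

-- ===== PRECONDITION & SPEC =====
def Spec_char_to_token_idx_py (char_idx : Int) (token_offsets : List (Int × Int)) (out : Int) : Prop := out = char_to_token_idx_py_alt char_idx token_offsets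
instance (char_idx : Int) (token_offsets : List (Int × Int)) (out : Int) : Decidable (Spec_char_to_token_idx_py char_idx token_offsets out) := by unfold Spec_char_to_token_idx_py; infer_instance

-- ===== CLAIM (what is proved, stated in full; the proofs are below) =====
def Claim_equal_char_to_token_idx_py : Prop := ∀ (char_idx : Int) (token_offsets : List (Int × Int)), Dom_char_to_token_idx_py char_idx token_offsets → Spec_char_to_token_idx_py char_idx token_offsets (char_to_token_idx_py char_idx token_offsets)

-- ===== LEMMAS AND PROOFS =====

-- the index list B builds, starting enumeration at n
def ctiMatches (c : Int) (l : List (Int × Int)) (n : Int) : List Int :=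
  (PySem.List.enumerate l n).filterMap
    (fun p => if p.2.1 ≤ c ∧ c < p.2.2 then some p.1 else none)

theorem ctiMatches_cons (c : Int) (s e : Int) (l : List (Int × Int)) (n : Int) :
    ctiMatches c ((s, e) :: l) n =
      if s ≤ c ∧ c < e then n :: ctiMatches c l (n + 1) else ctiMatches c l (n + 1) := by
  simp only [ctiMatches, PySem.List.enumerate_cons, List.filterMap_cons]
  split_ifs <;> rfl

theorem ctiMatches_ge (c : Int) (l : List (Int × Int)) (n : Int) :
    ∀ x ∈ ctiMatches c l n, n ≤ x := by
  induction l generalizing n with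
  | nil => simp [ctiMatches, PySem.List.enumerate_nil]
  | cons p rest ih =>
    obtain ⟨s, e⟩ := p
    intro x hx
    rw [ctiMatches_cons] at hx
    split_ifs at hx with h
    · rw [List.mem_cons] at hx
      rcases hx with h1 | h2
      · omega
      · have := ih (n + 1) x h2; omega
    · have := ih (n + 1) x hx; omega

theorem foldl_min_of_ge (n : Int) (M : List Int) (h : ∀ x ∈ M, n ≤ x) :
    M.foldl min n = n := by
  induction M generalizing n with
  | nil => rfl
  | cons a t ih =>
    have ha : n ≤ a := h a (by simp)
    simp only [List.foldl_cons, min_eq_left ha]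
    exact ih n (fun x hx => h x (by simp [hx]))

theorem ctiA_go_eq (c : Int) (l : List (Int × Int)) (n : Int) :
    ctiA_go c n l =
      match PySem.List.min? (ctiMatches c l n) (fun x => x) with
      | some m => m
      | none => -1 := by
  induction l generalizing n with
  | nil => simp [ctiA_go, ctiMatches, PySem.List.enumerate_nil, PySem.List.min?]
  | cons p rest ih =>
    obtain ⟨s, e⟩ := p
    rw [ctiMatches_cons]
    by_cases h : s ≤ c ∧ c < e
    · simp only [ctiA_go, if_pos h, PySem.List.min?_id_cons]
      have := foldl_min_of_ge n (ctiMatches c rest (n + 1))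
        (fun x hx => by have := ctiMatches_ge c rest (n + 1) x hx; omega)
      simp [this]
    · simp only [ctiA_go, if_neg h]
      exact ih (n + 1)

-- ===== VERDICT (by name: the statement is the Claim_ definition above) =====
theorem char_to_token_idx_py_spec : Claim_equal_char_to_token_idx_py := by
  intro c offs _
  unfold Spec_char_to_token_idx_py char_to_token_idx_py char_to_token_idx_py_alt
  rw [ctiA_go_eq c offs 0]
  rfl
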